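-- pv_equiv track=rewrite | github.com/TsukihanaNo/Lens-Designer | LensDesigner.py | GenerateLuxTable
-- ===== SOURCE A (Python) =====
-- def GenerateLuxTable(distanceLuxMain):
--     distanceLux=[]
--     table = distanceLuxMain
--     for i in range(len(table)):
--         for j in range(len(table[i])):
--             if len(distanceLux)==0:
--                 distanceLux.append(table[i][j])
--             else:
--                 for k in range(len(distanceLux)):
--                     if table[i][j][0]==distanceLux[k][0]:
--                         distanceLux[k][1] = distanceLux[k][1] + table[i][j][1]
--                         break
--                     if k == len(distanceLux)-1:
--                         if table[i][j][0]!=distanceLux[k][0]: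
--                             distanceLux.append(table[i][j])
--     return distanceLux
-- ===== SOURCE B (Python) =====
-- def GenerateLuxTable(distanceLuxMain):
--     flat = [p for row in distanceLuxMain for p in row]
--     keys = [p[0] for p in flat]
--     count = {}
--     for k in keys:
--         count[k] = count.get(k, 0) + 1
--     sums = {}
--     for p in flat:
--         if count[p[0]] > 1:
--             sums[p[0]] = sums.get(p[0], 0) + p[1]
--     out = []
--     seen = set()
--     for p in flat:
--         k = p[0]
--         if k not in seen:
--             seen.add(k)
--             out.append(p if count[k] == 1 else p[:1] + [sums[k]] + p[2:])
--     return out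
-- ===== Notes on version B (the rewrite author's own statement) =====
-- stated objective: faster
-- what changed: Replaces A's online accumulation with nested linear scans by three staged passes over the flattened pairs: a counting pass over the keys, a conditional summing pass for duplicated keys, and a rebuild pass that keeps each first-occurrence pair and writes its precomputed total.
-- outside the precondition, e.g. on GenerateLuxTable([[[]]]): A returns [[]], B raises IndexError
import Mathlib
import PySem

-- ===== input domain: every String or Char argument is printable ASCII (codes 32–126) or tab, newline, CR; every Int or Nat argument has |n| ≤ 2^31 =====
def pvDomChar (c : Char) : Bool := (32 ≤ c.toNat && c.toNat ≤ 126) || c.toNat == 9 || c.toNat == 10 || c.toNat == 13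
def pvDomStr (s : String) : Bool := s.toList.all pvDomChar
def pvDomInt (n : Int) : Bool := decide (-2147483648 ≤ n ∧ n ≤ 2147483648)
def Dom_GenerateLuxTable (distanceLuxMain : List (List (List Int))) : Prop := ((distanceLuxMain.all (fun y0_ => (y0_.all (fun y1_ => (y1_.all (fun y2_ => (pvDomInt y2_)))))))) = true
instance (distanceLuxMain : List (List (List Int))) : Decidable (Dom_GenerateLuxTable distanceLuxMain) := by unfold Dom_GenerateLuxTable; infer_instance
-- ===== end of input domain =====

-- B replaces A's online accumulator with its nested linear scans by three staged passes
-- (count keys, sum values of duplicated keys, rebuild from the first-occurrence pairs);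
-- objective: faster. A mutates the input's inner lists in Python, B does not: the
-- equivalence proved here is about the RETURN value only.

-- ===== PORT A =====
-- inner `for k in range(len(distanceLux))` loop of A, as structural recursion over the
-- accumulator (same comparisons in the same order; `rest = []` is A's `k == len-1`);
-- indexing xx[0]/xx[1] is done with getD, exact on Pre_ (all reads are in range there)
def pvAScan (p : List Int) : List (List Int) → List (List Int)
  | [] => []
  | e :: rest =>
    if p.getD 0 0 = e.getD 0 0 then
      (e.set 1 (e.getD 1 0 + p.getD 1 0)) :: rest
    else if rest = [] then
      (if p.getD 0 0 ≠ e.getD 0 0 then [e, p] else [e])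
    else
      e :: pvAScan p rest

def pvAStep (acc : List (List Int)) (p : List Int) : List (List Int) :=
  if acc = [] then acc ++ [p] else pvAScan p acc

def GenerateLuxTable (distanceLuxMain : List (List (List Int))) : List (List Int) :=
  distanceLuxMain.foldl (fun acc row => row.foldl pvAStep acc) []

-- ===== PORT B =====
-- step of B's second pass: add p[1] to sums[p[0]] when p's key is duplicated
def pvSumStep (count : PySem.Dict Int Int) (s : PySem.Dict Int Int) (p : List Int) : PySem.Dict Int Int :=
  if 1 < count.getD (p.getD 0 0) 0 then s.insert (p.getD 0 0) (s.getD (p.getD 0 0) 0 + p.getD 1 0) else s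

-- step of B's third pass: append the entry for each key not seen yet
def pvOutStep (count sums : PySem.Dict Int Int) (st : List (List Int) × PySem.Set Int) (p : List Int) :
    List (List Int) × PySem.Set Int :=
  let k := p.getD 0 0
  if st.2.contains k then st
  else (st.1 ++ [if count.getD k 0 = 1 then p else p.take 1 ++ [sums.getD k 0] ++ p.drop 2],
        PySem.Set.add st.2 k)

def GenerateLuxTable_alt (distanceLuxMain : List (List (List Int))) : List (List Int) :=
  let flat := distanceLuxMain.flatMap id
  let keys := flat.map (fun p => p.getD 0 0)
  let count := keys.foldl (fun d x => d.insert x (d.getD x 0 + 1)) PySem.Dict.empty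
  let sums := flat.foldl (pvSumStep count) PySem.Dict.empty
  (flat.foldl (pvOutStep count sums) ([], PySem.Set.ofList [])).1

-- ===== PRECONDITION & SPEC =====
-- Pre_ excludes exactly the inputs where Python A raises IndexError (an empty inner pair,
-- or a pair shorter than 2 whose key occurs more than once), plus the single corner where
-- the flattened input is exactly one empty pair: there A returns that pair unread while
-- B raises IndexError (see the cite in claim.json).
def Pre_GenerateLuxTable (distanceLuxMain : List (List (List Int))) : Prop :=
  (∀ p ∈ distanceLuxMain.flatten, p ≠ []) ∧
  (∀ p ∈ distanceLuxMain.flatten,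
     1 < (distanceLuxMain.flatten.filter (fun q => q.getD 0 0 == p.getD 0 0)).length → 2 ≤ p.length)
instance (distanceLuxMain : List (List (List Int))) : Decidable (Pre_GenerateLuxTable distanceLuxMain) := by unfold Pre_GenerateLuxTable; infer_instance

def pvWitness_GenerateLuxTable : List (List (List Int)) := [[[1, 2], [1, 3]], [[2, 5]]]

def Spec_GenerateLuxTable (distanceLuxMain : List (List (List Int))) (out : List (List Int)) : Prop := out = GenerateLuxTable_alt distanceLuxMain
instance (distanceLuxMain : List (List (List Int))) (out : List (List Int)) : Decidable (Spec_GenerateLuxTable distanceLuxMain out) := by unfold Spec_GenerateLuxTable; infer_instance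

-- ===== CLAIM (what is proved, stated in full; the proofs are below) =====
def Claim_equal_GenerateLuxTable : Prop := ∀ (distanceLuxMain : List (List (List Int))), Dom_GenerateLuxTable distanceLuxMain → Pre_GenerateLuxTable distanceLuxMain → Spec_GenerateLuxTable distanceLuxMain (GenerateLuxTable distanceLuxMain)

-- ===== LEMMAS AND PROOFS =====

-- key of a pair, its occurrences, their count and value total
def pvKey (e : List Int) : Int := e.getD 0 0
def pvGrp (F : List (List Int)) (k : Int) : List (List Int) := F.filter (fun q => pvKey q == k)
def pvCnt (F : List (List Int)) (k : Int) : Nat := (pvGrp F k).length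
def pvTot (F : List (List Int)) (k : Int) : Int := ((pvGrp F k).map (fun q => q.getD 1 0)).sum

-- the first pair of each distinct key, in first-occurrence order
def pvFirstPairs : List (List Int) → List (List Int)
  | [] => []
  | p :: r => p :: (pvFirstPairs r).filter (fun e => pvKey e != pvKey p)

-- the final value both programs produce for first pair p: p itself for a unique key,
-- else p with slot 1 replaced by the key's total
def pvEntry (F : List (List Int)) (p : List Int) : List Int :=
  if pvCnt F (pvKey p) ≤ 1 then p else p.set 1 (pvTot F (pvKey p))

def pvAVal (F : List (List Int)) : List (List Int) := (pvFirstPairs F).map (pvEntry F)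

-- B's rebuilt entry, via the two dicts
def pvBE (count sums : PySem.Dict Int Int) (p : List Int) : List Int :=
  if count.getD (pvKey p) 0 = 1 then p else p.take 1 ++ [sums.getD (pvKey p) 0] ++ p.drop 2

-- duplicated keys have pairs of length ≥ 2 (the second conjunct of Pre_ on the flattened list)
def pvH (F : List (List Int)) : Prop := ∀ p ∈ F, 1 < pvCnt F (pvKey p) → 2 ≤ p.length

theorem pvKey_set (e : List Int) (x : Int) : pvKey (e.set 1 x) = pvKey e := by
  simp [pvKey, List.getD, List.getElem?_set_ne]

theorem pvKey_pvEntry (F : List (List Int)) (p : List Int) : pvKey (pvEntry F p) = pvKey p := by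
  unfold pvEntry; split
  · rfl
  · exact pvKey_set p _

theorem pvGrp_append (F G : List (List Int)) (k : Int) :
    pvGrp (F ++ G) k = pvGrp F k ++ pvGrp G k := by
  simp [pvGrp]

theorem pvCnt_append_singleton (F : List (List Int)) (q : List Int) (k : Int) :
    pvCnt (F ++ [q]) k = pvCnt F k + (if pvKey q = k then 1 else 0) := by
  unfold pvCnt
  rw [pvGrp_append, List.length_append]
  by_cases h : pvKey q = k <;> simp [pvGrp, h]

theorem pvTot_append_singleton (F : List (List Int)) (q : List Int) (k : Int) :
    pvTot (F ++ [q]) k = pvTot F k + (if pvKey q = k then q.getD 1 0 else 0) := by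
  unfold pvTot
  rw [pvGrp_append, List.map_append, List.sum_append]
  by_cases h : pvKey q = k <;> simp [pvGrp, h]

theorem mem_pvFirstPairs {p : List Int} : ∀ {F : List (List Int)}, p ∈ pvFirstPairs F → p ∈ F := by
  intro F
  induction F with
  | nil => simp [pvFirstPairs]
  | cons q r ih =>
    intro h
    rcases (List.mem_cons).1 h with h | h
    · exact h ▸ List.mem_cons_self
    · exact List.mem_cons_of_mem _ (ih (List.mem_of_mem_filter h))

theorem mem_keys_pvFirstPairs (F : List (List Int)) (k : Int) :
    (∃ e ∈ pvFirstPairs F, pvKey e = k) ↔ (∃ e ∈ F, pvKey e = k) := by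
  induction F with
  | nil => simp [pvFirstPairs]
  | cons q r ih =>
    constructor
    · rintro ⟨e, he, hk⟩
      rcases (List.mem_cons).1 he with h | h
      · exact ⟨q, List.mem_cons_self, h ▸ hk⟩
      · obtain ⟨e', he', hk'⟩ := ih.1 ⟨e, List.mem_of_mem_filter h, hk⟩
        exact ⟨e', List.mem_cons_of_mem _ he', hk'⟩
    · rintro ⟨e, he, hk⟩
      rcases (List.mem_cons).1 he with h | h
      · exact ⟨q, List.mem_cons_self, h ▸ hk⟩
      · by_cases hq : pvKey q = k
        · exact ⟨q, List.mem_cons_self, hq⟩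
        · obtain ⟨e', he', hk'⟩ := ih.2 ⟨e, h, hk⟩
          refine ⟨e', List.mem_cons_of_mem _ ?_, hk'⟩
          refine List.mem_filter.2 ⟨he', ?_⟩
          simp only [hk', bne_iff_ne, ne_eq]
          omega

theorem nodup_keys_pvFirstPairs (F : List (List Int)) : ((pvFirstPairs F).map pvKey).Nodup := by
  induction F with
  | nil => simp [pvFirstPairs]
  | cons q r ih =>
    simp only [pvFirstPairs, List.map_cons, List.nodup_cons]
    constructor
    · intro h
      obtain ⟨e, he, hk⟩ := List.mem_map.1 h
      have := (List.mem_filter.1 he).2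
      simp [hk] at this
    · exact (List.filter_sublist.map pvKey).nodup ih

theorem pvFirstPairs_append_singleton (F : List (List Int)) (q : List Int) :
    pvFirstPairs (F ++ [q]) =
      pvFirstPairs F ++ (if pvKey q ∈ F.map pvKey then [] else [q]) := by
  induction F with
  | nil => simp [pvFirstPairs]
  | cons p r ih =>
    simp only [List.cons_append, pvFirstPairs, ih, List.filter_append, List.map_cons,
      List.mem_cons]
    by_cases h1 : pvKey q = pvKey p
    · by_cases h2 : pvKey q ∈ r.map pvKey <;> simp [h1]
    · by_cases h2 : pvKey q ∈ r.map pvKey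
      · simp [h1, h2]
      · have : pvKey q != pvKey p := by simp [h1]
        simp [h1, h2, this]

-- pvFirstPairs commutes with filtering by a predicate on the key
theorem pvFirstPairs_filter_key (f : Int → Bool) :
    ∀ F : List (List Int),
      pvFirstPairs (F.filter (fun e => f (pvKey e))) =
        (pvFirstPairs F).filter (fun e => f (pvKey e)) := by
  intro F
  induction F with
  | nil => simp [pvFirstPairs]
  | cons q r ih =>
    by_cases hq : f (pvKey q)
    · simp only [List.filter_cons, hq, if_pos, pvFirstPairs, ih, List.filter_filter]
      refine congrArg (q :: ·) (List.filter_congr ?_)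
      intro e _
      by_cases h : pvKey e = pvKey q
      · simp [h, hq]
      · simp [Bool.and_comm]
    · simp only [List.filter_cons, hq, pvFirstPairs, ih, List.filter_filter,
        Bool.false_eq_true, if_false]
      refine List.filter_congr ?_
      intro e _
      by_cases h : pvKey e = pvKey q
      · simp [h, hq]
      · simp [h]

-- keys of A's closed-form value = keys of the first pairs
theorem map_key_pvAVal (F : List (List Int)) :
    (pvAVal F).map pvKey = (pvFirstPairs F).map pvKey := by
  unfold pvAVal
  rw [List.map_map]
  exact List.map_congr_left (fun p _ => pvKey_pvEntry F p)

theorem pvCnt_pos_of_mem {F : List (List Int)} {p : List Int} (h : p ∈ F) :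
    1 ≤ pvCnt F (pvKey p) := by
  have : p ∈ pvGrp F (pvKey p) := List.mem_filter.2 ⟨h, by simp⟩
  exact List.length_pos_of_mem this

theorem pvH_of_append {F : List (List Int)} {q : List Int} (h : pvH (F ++ [q])) : pvH F := by
  intro p hp hlt
  refine h p (List.mem_append_left _ hp) ?_
  have := pvCnt_append_singleton F q (pvKey p)
  omega

-- A's inner scan when the key is already present: update the unique matching entry
theorem pvAScan_mem (p : List Int) (acc : List (List Int))
    (hmem : pvKey p ∈ acc.map pvKey) (hnd : (acc.map pvKey).Nodup) :
    pvAScan p acc = acc.map (fun e => if pvKey e = pvKey p then e.set 1 (e.getD 1 0 + p.getD 1 0) else e) := by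
  induction acc with
  | nil => simp at hmem
  | cons e rest ih =>
    simp only [List.map_cons, List.nodup_cons, List.mem_cons] at hmem hnd
    by_cases he : pvKey p = pvKey e
    · have hmap : rest.map (fun e => if pvKey e = pvKey p then e.set 1 (e.getD 1 0 + p.getD 1 0) else e) = rest.map id := by
        apply List.map_congr_left
        intro x hx
        have : pvKey x ≠ pvKey p := by
          intro h; exact hnd.1 (by rw [← he, ← h]; exact List.mem_map_of_mem hx)
        simp [this]
      have hpe : p.getD 0 0 = e.getD 0 0 := he
      simp only [pvAScan, if_pos hpe, List.map_cons, if_pos he.symm]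
      rw [hmap, List.map_id]
    · have hmem' : pvKey p ∈ rest.map pvKey := hmem.resolve_left (fun h => he h)
      have hrest : rest ≠ [] := by rintro rfl; simp at hmem'
      have hne : ¬ p.getD 0 0 = e.getD 0 0 := he
      simp only [pvAScan, if_neg hne, if_neg hrest, List.map_cons]
      rw [ih hmem' hnd.2]
      have : ¬ pvKey e = pvKey p := fun h => he h.symm
      simp [this]

-- A's inner scan when the key is new: append the pair
theorem pvAScan_not_mem (p : List Int) (acc : List (List Int))
    (hmem : pvKey p ∉ acc.map pvKey) (hne : acc ≠ []) :
    pvAScan p acc = acc ++ [p] := by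
  induction acc with
  | nil => exact absurd rfl hne
  | cons e rest ih =>
    simp only [List.map_cons, List.mem_cons] at hmem
    rw [not_or] at hmem
    have h1 : ¬ p.getD 0 0 = e.getD 0 0 := hmem.1
    by_cases hr : rest = []
    · subst hr
      simp only [pvAScan]
      rw [if_neg h1, if_pos trivial, if_pos h1]
      rfl
    · simp only [pvAScan, if_neg h1, if_neg hr, List.cons_append]
      rw [ih hmem.2 hr]

-- one A-step matches extending the closed form by one pair
theorem pvAStep_pvAVal (F : List (List Int)) (q : List Int) (hH : pvH (F ++ [q])) :
    pvAStep (pvAVal F) q = pvAVal (F ++ [q]) := by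
  by_cases hmem : pvKey q ∈ F.map pvKey
  · -- key already present: the unique matching entry is updated
    have hmem' : pvKey q ∈ (pvAVal F).map pvKey := by
      rw [map_key_pvAVal]
      obtain ⟨e, he, hk⟩ := List.mem_map.1 hmem
      obtain ⟨e', he', hk'⟩ := (mem_keys_pvFirstPairs F (pvKey q)).2 ⟨e, he, hk⟩
      exact List.mem_map.2 ⟨e', he', hk'⟩
    have hne : pvAVal F ≠ [] := by
      rintro h; rw [h] at hmem'; simp at hmem'
    have hnd : ((pvAVal F).map pvKey).Nodup := by
      rw [map_key_pvAVal]; exact nodup_keys_pvFirstPairs F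
    rw [pvAStep, if_neg hne, pvAScan_mem q (pvAVal F) hmem' hnd]
    unfold pvAVal
    rw [pvFirstPairs_append_singleton, if_pos hmem, List.append_nil, List.map_map]
    apply List.map_congr_left
    intro p hp
    simp only [Function.comp_apply]
    have hkeyE : pvKey (pvEntry F p) = pvKey p := pvKey_pvEntry F p
    by_cases hk : pvKey p = pvKey q
    · -- the matching entry
      have hcnt1 : 1 ≤ pvCnt F (pvKey p) := pvCnt_pos_of_mem (mem_pvFirstPairs hp)
      have hcnt' : pvCnt (F ++ [q]) (pvKey p) = pvCnt F (pvKey p) + 1 := by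
        rw [pvCnt_append_singleton, if_pos hk.symm]
      have htot' : pvTot (F ++ [q]) (pvKey p) = pvTot F (pvKey p) + q.getD 1 0 := by
        rw [pvTot_append_singleton, if_pos hk.symm]
      rw [if_pos (hkeyE.trans hk)]
      have hnotle : ¬ pvCnt (F ++ [q]) (pvKey p) ≤ 1 := by omega
      by_cases hone : pvCnt F (pvKey p) ≤ 1
      · -- p was the only pair of its key so far
        have hgrp1 : pvGrp F (pvKey p) = [p] := by
          have hmp : p ∈ pvGrp F (pvKey p) := List.mem_filter.2 ⟨mem_pvFirstPairs hp, by simp⟩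
          have hlen : (pvGrp F (pvKey p)).length = 1 := le_antisymm hone hcnt1
          obtain ⟨a, ha⟩ := List.length_eq_one_iff.1 hlen
          rw [ha] at hmp ⊢
          simp at hmp
          rw [hmp]
        have htotp : pvTot F (pvKey p) = p.getD 1 0 := by
          unfold pvTot; rw [hgrp1]; simp
        unfold pvEntry
        rw [if_pos hone, if_neg hnotle, htot', htotp]
      · -- p's key was already duplicated: its slot 1 holds the running total
        have hlen2 : 2 ≤ p.length := by
          refine hH p (List.mem_append_left _ (mem_pvFirstPairs hp)) ?_
          omega
        unfold pvEntry
        rw [if_neg hone, if_neg hnotle, htot']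
        have hget : (p.set 1 (pvTot F (pvKey p))).getD 1 0 = pvTot F (pvKey p) := by
          have h1 : 1 < p.length := by omega
          simp [List.getD, h1]
        rw [hget, List.set_set]
    · -- entries of other keys are unchanged
      rw [if_neg (by rw [hkeyE]; exact hk)]
      have h1 : pvCnt (F ++ [q]) (pvKey p) = pvCnt F (pvKey p) := by
        rw [pvCnt_append_singleton, if_neg (fun h => hk h.symm)]
        omega
      have h2 : pvTot (F ++ [q]) (pvKey p) = pvTot F (pvKey p) := by
        rw [pvTot_append_singleton, if_neg (fun h => hk h.symm)]; ring
      unfold pvEntry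
      rw [h1, h2]
  · -- new key: both sides append q
    have hent : ∀ p ∈ pvFirstPairs F, pvEntry (F ++ [q]) p = pvEntry F p := by
      intro p hp
      have hk : pvKey q ≠ pvKey p := by
        intro h
        exact hmem (h ▸ List.mem_map_of_mem (mem_pvFirstPairs hp))
      have h1 : pvCnt (F ++ [q]) (pvKey p) = pvCnt F (pvKey p) := by
        rw [pvCnt_append_singleton, if_neg hk]
        omega
      have h2 : pvTot (F ++ [q]) (pvKey p) = pvTot F (pvKey p) := by
        rw [pvTot_append_singleton, if_neg hk]; ring
      unfold pvEntry
      rw [h1, h2]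
    have hcnt0 : pvCnt F (pvKey q) = 0 := by
      by_contra h
      have hpos : 0 < (pvGrp F (pvKey q)).length := Nat.pos_of_ne_zero h
      obtain ⟨e, he⟩ := List.exists_mem_of_length_pos hpos
      have hef := List.mem_filter.1 he
      have hkq : pvKey e = pvKey q := by simpa using hef.2
      exact hmem (by rw [← hkq]; exact List.mem_map_of_mem hef.1)
    have hentq : pvEntry (F ++ [q]) q = q := by
      unfold pvEntry
      rw [pvCnt_append_singleton, if_pos rfl, hcnt0, if_pos (by omega)]
    have hAV : pvAVal (F ++ [q]) = pvAVal F ++ [q] := by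
      unfold pvAVal
      rw [pvFirstPairs_append_singleton, if_neg hmem, List.map_append]
      simp only [List.map_cons, List.map_nil, hentq]
      congr 1
      exact List.map_congr_left hent
    by_cases hnil : pvAVal F = []
    · have : pvFirstPairs F = [] := by
        by_contra h
        obtain ⟨e, he⟩ := List.exists_mem_of_ne_nil _ h
        exact (List.ne_nil_of_mem (List.mem_map_of_mem (f := pvEntry F) he)) hnil
      rw [pvAStep, if_pos hnil, hAV, hnil]
    · have hmem'' : pvKey q ∉ (pvAVal F).map pvKey := by
        rw [map_key_pvAVal]
        intro h
        obtain ⟨e, he, hk⟩ := List.mem_map.1 h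
        obtain ⟨e', he', hk'⟩ := (mem_keys_pvFirstPairs F (pvKey q)).1 ⟨e, he, hk⟩
        exact hmem (by rw [← hk']; exact List.mem_map_of_mem he')
      rw [pvAStep, if_neg hnil, pvAScan_not_mem q (pvAVal F) hmem'' hnil, hAV]

-- A's whole fold over the flattened pairs equals the closed form
theorem pvA_fold (F : List (List Int)) (hH : pvH F) : F.foldl pvAStep [] = pvAVal F := by
  induction F using List.reverseRecOn with
  | nil => rfl
  | append_singleton G q ih =>
    rw [List.foldl_append, List.foldl_cons, List.foldl_nil, ih (pvH_of_append hH),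
        pvAStep_pvAVal G q hH]

-- B's count dict holds the occurrence count of every key
theorem pvCount_getD (F : List (List Int)) (k : Int) :
    ((F.map (fun p => p.getD 0 0)).foldl (fun d x => d.insert x (d.getD x 0 + 1))
        PySem.Dict.empty).getD k 0 = (pvCnt F k : Int) := by
  rw [PySem.Dict.getD_foldl_insert_add_one, PySem.Dict.getD_empty]
  have : (F.map (fun p => p.getD 0 0)).count k = pvCnt F k := by
    rw [List.count_eq_countP, List.countP_map, pvCnt, pvGrp, ← List.countP_eq_length_filter]
    rfl
  rw [this]
  ring

-- B's sums dict holds the value total of every duplicated key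
theorem pvSums_getD (count : PySem.Dict Int Int) (k : Int) (hk : 1 < count.getD k 0) :
    ∀ (F : List (List Int)) (d : PySem.Dict Int Int),
      (F.foldl (pvSumStep count) d).getD k 0 = d.getD k 0 + pvTot F k := by
  intro F
  induction F with
  | nil => intro d; simp [pvTot, pvGrp]
  | cons p r ih =>
    intro d
    rw [List.foldl_cons, ih]
    by_cases hpk : pvKey p = k
    · have hc : 1 < count.getD (p.getD 0 0) 0 := by
        show 1 < count.getD (pvKey p) 0
        rw [hpk]; exact hk
      rw [pvSumStep, if_pos hc]
      have hg : (d.insert (p.getD 0 0) (d.getD (p.getD 0 0) 0 + p.getD 1 0)).getD k 0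
           = d.getD k 0 + p.getD 1 0 := by
        have hpk' : p.getD 0 0 = k := hpk
        rw [hpk', PySem.Dict.getD_insert_self]
      rw [hg]
      have ht : pvTot (p :: r) k = p.getD 1 0 + pvTot r k := by
        unfold pvTot pvGrp
        rw [List.filter_cons, if_pos (by simpa [pvKey] using hpk)]
        simp
      rw [ht]; ring
    · have htot : pvTot (p :: r) k = pvTot r k := by
        unfold pvTot pvGrp
        rw [List.filter_cons, if_neg (by simpa [pvKey] using hpk)]
      rw [htot, pvSumStep]
      split
      · have hne : k ≠ p.getD 0 0 := fun h => hpk h.symm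
        rw [PySem.Dict.getD_insert, if_neg hne]
      · rfl

-- B's third pass: the output list is the map of pvBE over the unseen first pairs
theorem pvOut_fold (count sums : PySem.Dict Int Int) :
    ∀ (F : List (List Int)) (out : List (List Int)) (seen : PySem.Set Int),
      (F.foldl (pvOutStep count sums) (out, seen)).1 =
        out ++ (pvFirstPairs (F.filter (fun p => !seen.contains (pvKey p)))).map (pvBE count sums) := by
  intro F
  induction F with
  | nil => intro out seen; simp [pvFirstPairs]
  | cons p r ih =>
    intro out seen
    rw [List.foldl_cons]
    by_cases hc : seen.contains (p.getD 0 0) = true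
    · have hstep : pvOutStep count sums (out, seen) p = (out, seen) := by
        rw [pvOutStep]; simp only []
        rw [if_pos hc]
      have hmem : p[0]?.getD 0 ∈ seen := by simpa [List.getD] using hc
      rw [hstep, ih, List.filter_cons, if_neg (by simp [pvKey, List.getD, hmem])]
    · have hcf : seen.contains (p.getD 0 0) = false := by
        cases h : seen.contains (p.getD 0 0)
        · rfl
        · exact absurd h hc
      have hstep : pvOutStep count sums (out, seen) p =
          (out ++ [pvBE count sums p], PySem.Set.add seen (pvKey p)) := by
        rw [pvOutStep]; simp only []
        rw [if_neg (by simpa [List.getD] using hcf)]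
        rfl
      have hmem : p[0]?.getD 0 ∉ seen := by simpa [List.getD] using hcf
      rw [hstep, ih, List.filter_cons, if_pos (by simp [pvKey, List.getD, hmem])]
      have hpred : (r.filter (fun e => !(PySem.Set.add seen (pvKey p)).contains (pvKey e)))
          = (r.filter (fun e => !seen.contains (pvKey e))).filter (fun e => pvKey e != pvKey p) := by
        rw [List.filter_filter]
        refine List.filter_congr ?_
        intro e _
        by_cases h1 : pvKey e ∈ seen <;> by_cases h2 : pvKey e = pvKey p <;>
          simp [PySem.Set.contains_eq_listContains, PySem.Set.mem_add, h1, h2]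
      have : pvFirstPairs (p :: r.filter (fun e => !seen.contains (pvKey e)))
          = p :: (pvFirstPairs (r.filter (fun e => !(PySem.Set.add seen (pvKey p)).contains (pvKey e)))) := by
        rw [pvFirstPairs, hpred, pvFirstPairs_filter_key (fun x => x != pvKey p)]
      rw [this]
      simp

-- B's rebuilt entry equals the closed-form entry, on first pairs of an H-list
theorem pvBE_eq_pvEntry (F : List (List Int)) (hH : pvH F) (p : List Int)
    (hp : p ∈ pvFirstPairs F) :
    pvBE ((F.map (fun p => p.getD 0 0)).foldl (fun d x => d.insert x (d.getD x 0 + 1)) PySem.Dict.empty)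
         (F.foldl (pvSumStep ((F.map (fun p => p.getD 0 0)).foldl (fun d x => d.insert x (d.getD x 0 + 1)) PySem.Dict.empty)) PySem.Dict.empty)
         p = pvEntry F p := by
  have hmem : p ∈ F := mem_pvFirstPairs hp
  have hcnt1 : 1 ≤ pvCnt F (pvKey p) := pvCnt_pos_of_mem hmem
  rw [pvBE, pvCount_getD]
  by_cases hone : pvCnt F (pvKey p) = 1
  · rw [if_pos (show ((pvCnt F (pvKey p) : Int)) = 1 by exact_mod_cast hone), pvEntry,
        if_pos (by omega)]
  · have hlt : 1 < pvCnt F (pvKey p) := by omega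
    rw [if_neg (show ¬ ((pvCnt F (pvKey p) : Int)) = 1 by exact_mod_cast hone), pvEntry,
        if_neg (by omega)]
    have hkc : (1 : Int) < ((F.map (fun p => p.getD 0 0)).foldl (fun d x => d.insert x (d.getD x 0 + 1)) (PySem.Dict.empty : PySem.Dict Int Int)).getD (pvKey p) 0 := by
      rw [pvCount_getD]; exact_mod_cast hlt
    rw [pvSums_getD _ _ hkc F PySem.Dict.empty, PySem.Dict.getD_empty]
    have hlen : 2 ≤ p.length := hH p hmem hlt
    obtain ⟨a, t, rfl⟩ : ∃ a t, p = a :: t := by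
      cases p with
      | nil => simp at hlen
      | cons a t => exact ⟨a, t, rfl⟩
    obtain ⟨b, t', rfl⟩ : ∃ b t', t = b :: t' := by
      cases t with
      | nil => simp at hlen
      | cons b t' => exact ⟨b, t', rfl⟩
    simp [List.set]

-- ===== VERDICT (by name: the statement is the Claim_ definition above) =====
theorem GenerateLuxTable_spec : Claim_equal_GenerateLuxTable := by
  intro l _hdom hpre
  show GenerateLuxTable l = GenerateLuxTable_alt l
  have hH : pvH l.flatten := hpre.2
  have hA : GenerateLuxTable l = (l.flatten).foldl pvAStep [] := by
    rw [GenerateLuxTable, List.foldl_flatten]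
  have hflat : l.flatMap id = l.flatten := List.flatMap_id
  rw [hA, pvA_fold _ hH, GenerateLuxTable_alt]
  simp only [hflat]
  rw [pvOut_fold]
  have : (l.flatten).filter (fun p => !(PySem.Set.ofList ([] : List Int)).contains (pvKey p)) = l.flatten := by
    apply List.filter_eq_self.2
    intro e _
    simp [PySem.Set.ofList, PySem.Set.contains_eq_listContains]
  rw [this, List.nil_append, pvAVal]
  exact (List.map_congr_left (fun p hp => pvBE_eq_pvEntry l.flatten hH p hp)).symm
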